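-- pv_equiv track=rewrite | github.com/ryukago/Tucil-1-Kripto | hill.py | textToMatrix
-- ===== SOURCE A (Python) =====
-- def textToMatrix(text, m):
--     text_matrix = []
--     size = m
--     for i in range(len(text) // m):
--         text_matrix.append([])
--         for j in range(m):
--             text_matrix[i].append((ord(text[m * i + j]) - 97) % 26)
--     return(text_matrix)
-- ===== SOURCE B (Python) =====
-- def textToMatrix(text, m):
--     codes = [(ord(c) - 97) % 26 for c in text]
--     return [codes[i * m:(i + 1) * m] for i in range(len(text) // m)]
-- ===== Notes on version B (the rewrite author's own statement) =====
-- stated objective: simpler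
-- what changed: B maps all characters to codes in one flat pass and then reshapes the flat list into rows by slicing, instead of A's nested index-arithmetic loops appending element by element.
import Mathlib
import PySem

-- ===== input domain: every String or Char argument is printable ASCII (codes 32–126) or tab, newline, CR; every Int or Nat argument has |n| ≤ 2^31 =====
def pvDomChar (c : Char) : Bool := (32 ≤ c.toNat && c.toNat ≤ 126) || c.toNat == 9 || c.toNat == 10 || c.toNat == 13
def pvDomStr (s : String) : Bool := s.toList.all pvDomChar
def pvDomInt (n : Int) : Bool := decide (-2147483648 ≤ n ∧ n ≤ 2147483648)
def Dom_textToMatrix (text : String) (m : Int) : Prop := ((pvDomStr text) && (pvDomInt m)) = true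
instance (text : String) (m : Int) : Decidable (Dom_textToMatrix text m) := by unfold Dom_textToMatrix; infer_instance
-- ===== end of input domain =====

-- B = one flat char→code pass, then reshape by slicing; A = nested loops with m*i+j index arithmetic. Same values.

-- ===== PORT A =====
-- ord(text[m*i+j]) is ported with pyGetD; under Pre_ (m ≠ 0) the index is always in range
-- (i < len(text)//m and j < m), so the default is never used.
def textToMatrix (text : String) (m : Int) : List (List Int) :=
  let cs := text.toList
  (PySem.List.pyRange 0 (PySem.Int.floordiv (cs.length : Int) m) 1).foldl
    (fun mat i =>
      mat ++ [(PySem.List.pyRange 0 m 1).foldl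
        (fun row j =>
          row ++ [PySem.Int.mod (((PySem.List.pyGetD cs (m * i + j) 'a').toNat : Int) - 97) 26]) []])
    []

-- ===== PORT B =====
def textToMatrix_alt (text : String) (m : Int) : List (List Int) :=
  let codes := text.toList.map (fun c => PySem.Int.mod ((c.toNat : Int) - 97) 26)
  (PySem.List.pyRange 0 (PySem.Int.floordiv (text.toList.length : Int) m) 1).map
    (fun i => PySem.List.slice codes (some (i * m)) (some ((i + 1) * m)))

-- ===== PRECONDITION & SPEC =====
-- Pre_ excludes only m = 0, where Python's `len(text) // m` raises ZeroDivisionError.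
def Pre_textToMatrix (_text : String) (m : Int) : Prop := m ≠ 0
instance (text : String) (m : Int) : Decidable (Pre_textToMatrix text m) := by unfold Pre_textToMatrix; infer_instance
def pvWitness_textToMatrix : String × Int := ("hello", 2)

def Spec_textToMatrix (text : String) (m : Int) (out : List (List Int)) : Prop := out = textToMatrix_alt text m
instance (text : String) (m : Int) (out : List (List Int)) : Decidable (Spec_textToMatrix text m out) := by unfold Spec_textToMatrix; infer_instance

-- ===== CLAIM (what is proved, stated in full; the proofs are below) =====
def Claim_equal_textToMatrix : Prop := ∀ (text : String) (m : Int), Dom_textToMatrix text m → Pre_textToMatrix text m → Spec_textToMatrix text m (textToMatrix text m)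

-- ===== LEMMAS AND PROOFS =====

-- n // m ≤ 0 for 0 ≤ n, m < 0 (so both programs return [] for negative m)
lemma floordiv_nonpos_of_neg (n m : Int) (hn : 0 ≤ n) (hm : m < 0) :
    PySem.Int.floordiv n m ≤ 0 := by
  have h := PySem.Int.floordiv_mul_add_mod n m
  have hb := PySem.Int.mod_neg_bounds n hm
  by_contra h1
  rw [not_le] at h1
  have : PySem.Int.floordiv n m * m ≤ 1 * m := by
    apply mul_le_mul_of_nonpos_right (by omega) (le_of_lt hm)
  omega

-- the row A builds for index i equals B's slice, for m > 0 and 0 ≤ i < n // m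
lemma row_eq (cs : List Char) (m i : Int) (hm : 0 < m) (hi : 0 ≤ i)
    (hlt : i < PySem.Int.floordiv (cs.length : Int) m) :
    (PySem.List.pyRange 0 m 1).foldl
      (fun row j =>
        row ++ [PySem.Int.mod (((PySem.List.pyGetD cs (m * i + j) 'a').toNat : Int) - 97) 26]) []
    = PySem.List.slice (cs.map (fun c => PySem.Int.mod ((c.toNat : Int) - 97) 26))
        (some (i * m)) (some ((i + 1) * m)) := by
  have hub : (i + 1) * m ≤ (cs.length : Int) := by
    have := (PySem.Int.le_floordiv_iff_mul_le (a := (cs.length : Int)) (b := m) (q := i + 1) hm).mp (by omega)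
    exact this
  have him : 0 ≤ i * m := mul_nonneg hi (le_of_lt hm)
  have hlen : (i * m).toNat + m.toNat ≤ cs.length := by
    have : i * m + m = (i + 1) * m := by ring
    omega
  have hsum : i * m + m = (i + 1) * m := by ring
  have ht : ((i + 1) * m).toNat = (i * m).toNat + m.toNat := by omega
  rw [PySem.List.foldl_append_singleton_eq_map]
  rw [PySem.List.slice_toNat _ him (by positivity)]
  apply List.ext_getElem
  · simp [PySem.List.length_pyRange_one, ht]
    omega
  · intro p h1 h2
    simp only [List.nil_append, List.getElem_map, PySem.List.getElem_pyRange_one,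
      List.getElem_take, List.getElem_drop]
    have hp : p < m.toNat := by
      simpa [PySem.List.length_pyRange_one] using h1
    have hidx : m * i + (0 + (p : Int)) = (((i * m).toNat + p : Nat) : Int) := by
      rw [mul_comm m i]
      push_cast
      omega
    rw [hidx, PySem.List.pyGetD_natCast]
    have hin : (i * m).toNat + p < cs.length := by omega
    rw [List.getD_eq_getElem _ _ hin]

-- ===== VERDICT (by name: the statement is the Claim_ definition above) =====
theorem textToMatrix_spec : Claim_equal_textToMatrix := by
  intro text m _ hm
  unfold Spec_textToMatrix textToMatrix textToMatrix_alt
  simp only []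
  set cs := text.toList with hcs
  rcases lt_or_gt_of_ne hm with hneg | hpos
  · -- m < 0 : the outer range is empty on both sides
    have : PySem.Int.floordiv (cs.length : Int) m ≤ 0 :=
      floordiv_nonpos_of_neg _ _ (by positivity) hneg
    have hr : PySem.List.pyRange 0 (PySem.Int.floordiv (cs.length : Int) m) 1 = [] := by
      rw [PySem.List.pyRange_one]
      simp
      omega
    rw [hr]
    simp
  · -- m > 0 : A's outer foldl-append is a map; rows agree pointwise
    rw [PySem.List.foldl_append_singleton_eq_map]
    apply List.map_congr_left
    intro i hi
    rw [PySem.List.mem_pyRange_one] at hi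
    exact row_eq cs m i hpos hi.1 hi.2
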